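-- pv_equiv track=rewrite | github.com/DangerousCrocodile/2021-2-level-labs | lab_4/main.py | tokenize_by_letters
-- ===== SOURCE A (Python) =====
-- from typing import Tuple
--
-- def tokenize_by_letters(text: str) -> Tuple or int:
--     """
--     Tokenizes given sequence by letters
--     """
--     if not isinstance(text, str):
--         return -1
--     new_text = []
--     text = text.lower()
--     for letter in text:
--         if letter.isalpha() or letter.isspace():
--             new_text.append(letter)
--     new_text = "".join(new_text)
--     words = []
--     for word in new_text.split():
--         letters = ['_']
--         for symbol in word:
--             letters.append(symbol)
--         letters.append("_")
--         words.append(tuple(letters))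
--     return tuple(words)
-- ===== SOURCE B (Python) =====
-- def tokenize_by_letters(text):
--     """
--     Tokenizes given sequence by letters (single streaming pass).
--     """
--     if not isinstance(text, str):
--         return -1
--     words = []
--     current = []
--     for ch in text.lower():
--         if ch.isalpha():
--             current.append(ch)
--         elif ch.isspace():
--             if current:
--                 words.append(('_', *current, '_'))
--                 current = []
--         # other characters are simply deleted (they do not split words)
--     if current:
--         words.append(('_', *current, '_'))
--     return tuple(words)
-- ===== Notes on version B (the rewrite author's own statement) =====
-- stated objective: alternative
-- what changed: Replaced the filter-then-join-then-split-then-wrap multi-pass pipeline by one streaming pass that accumulates the current word and flushes it on whitespace, building no intermediate filtered string.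
import Mathlib
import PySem

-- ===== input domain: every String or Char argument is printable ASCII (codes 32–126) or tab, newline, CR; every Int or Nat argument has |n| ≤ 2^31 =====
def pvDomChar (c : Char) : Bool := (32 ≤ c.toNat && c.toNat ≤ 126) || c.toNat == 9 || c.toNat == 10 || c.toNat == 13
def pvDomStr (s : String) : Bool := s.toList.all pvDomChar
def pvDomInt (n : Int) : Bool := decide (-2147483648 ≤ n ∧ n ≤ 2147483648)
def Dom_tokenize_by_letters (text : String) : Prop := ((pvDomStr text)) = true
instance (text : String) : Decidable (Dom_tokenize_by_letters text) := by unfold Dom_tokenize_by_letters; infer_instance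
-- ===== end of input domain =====

-- B replaces A's filter/join/split/wrap pipeline with one streaming pass (flush word on whitespace); same values, different decomposition.

-- ===== PORT A =====
-- filter letters/spaces, join, split on whitespace, wrap each word in '_'
def tokenize_by_letters (text : String) : List (List String) :=
  (PySem.Chars.split₀
      ((PySem.Chars.lower text.toList).foldl
        (fun acc c => if PySem.Chars.isalpha c || PySem.Chars.isspace c then acc ++ [c] else acc)
        [])).foldl
    (fun ws w => ws ++ [(w.foldl (fun ls s => ls ++ [String.ofList [s]]) ["_"]) ++ ["_"]]) []

-- ===== PORT B =====
-- ('_', *current, '_')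
def pvWrap (cur : List Char) : List String :=
  "_" :: (cur.map (fun c => String.ofList [c]) ++ ["_"])

-- the streaming loop of Source B: words collected so far, current word in progress
def pvGo : List Char → List (List String) → List Char → List (List String)
  | [], words, cur => if cur.isEmpty then words else words ++ [pvWrap cur]
  | c :: rest, words, cur =>
    if PySem.Chars.isalpha c then pvGo rest words (cur ++ [c])
    else if PySem.Chars.isspace c then
      (if cur.isEmpty then pvGo rest words [] else pvGo rest (words ++ [pvWrap cur]) [])
    else pvGo rest words cur

def tokenize_by_letters_alt (text : String) : List (List String) :=
  pvGo (PySem.Chars.lower text.toList) [] []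

-- ===== PRECONDITION & SPEC =====
def Spec_tokenize_by_letters (text : String) (out : List (List String)) : Prop := out = tokenize_by_letters_alt text
instance (text : String) (out : List (List String)) : Decidable (Spec_tokenize_by_letters text out) := by unfold Spec_tokenize_by_letters; infer_instance

-- ===== CLAIM (what is proved, stated in full; the proofs are below) =====
def Claim_equal_tokenize_by_letters : Prop := ∀ (text : String), Dom_tokenize_by_letters text → Spec_tokenize_by_letters text (tokenize_by_letters text)

-- ===== LEMMAS AND PROOFS =====

-- Python's str.isalpha (ASCII letters, per PySem's definition) and str.isspace are disjoint
lemma pv_alpha_not_space (c : Char) (h : PySem.Chars.isalpha c = true) :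
    PySem.Chars.isspace c = false := by
  simp only [PySem.Chars.isalpha, PySem.Chars.isupper, PySem.Chars.islower,
    PySem.Chars.isspace, Char.le_def, UInt32.le_iff_toNat_le, Bool.or_eq_true, Bool.and_eq_true,
    decide_eq_true_eq, Bool.or_eq_false_iff, Bool.and_eq_false_iff, decide_eq_false_iff_not,
    not_le] at *
  have h1 : ('A').val.toNat = 65 := rfl
  have h2 : ('Z').val.toNat = 90 := rfl
  have h3 : ('a').val.toNat = 97 := rfl
  have h4 : ('z').val.toNat = 122 := rfl
  simp only [Char.toNat] at *
  omega

-- B's streaming loop equals split₀.go on the filtered characters, mapped through pvWrap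
lemma pvGo_eq_splitgo : ∀ (cs cur : List Char) (acc : List (List Char)),
    (∀ c ∈ cur, PySem.Chars.isalpha c = true) →
    pvGo cs ((acc.reverse).map pvWrap) cur
      = (PySem.Chars.split₀.go
          (cs.filter (fun c => PySem.Chars.isalpha c || PySem.Chars.isspace c))
          cur.reverse acc).map pvWrap := by
  intro cs
  induction cs with
  | nil =>
    intro cur acc _
    simp only [List.filter_nil, pvGo, PySem.Chars.split₀.go]
    by_cases hc : cur.isEmpty
    · simp [hc]
    · simp [hc]
  | cons c rest ih =>
    intro cur acc hcur
    by_cases ha : PySem.Chars.isalpha c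
    · have hs := pv_alpha_not_space c ha
      have hcur' : ∀ x ∈ cur ++ [c], PySem.Chars.isalpha x = true := by
        intro x hx
        rcases List.mem_append.1 hx with h | h
        · exact hcur x h
        · simp only [List.mem_singleton] at h
          subst h; exact ha
      have hstep : pvGo (c :: rest) ((acc.reverse).map pvWrap) cur
          = pvGo rest ((acc.reverse).map pvWrap) (cur ++ [c]) := by
        simp [pvGo, ha]
      rw [hstep, ih (cur ++ [c]) acc hcur']
      simp [ha, hs, PySem.Chars.split₀.go]
    · by_cases hs : PySem.Chars.isspace c
      · by_cases hc : cur.isEmpty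
        · have hcur0 : cur = [] := by simpa [List.isEmpty_iff] using hc
          subst hcur0
          have hstep : pvGo (c :: rest) ((acc.reverse).map pvWrap) []
              = pvGo rest ((acc.reverse).map pvWrap) [] := by
            simp [pvGo, ha, hs]
          rw [hstep, ih [] acc (by intro x hx; simp at hx)]
          simp [ha, hs, PySem.Chars.split₀.go]
        · have hstep : pvGo (c :: rest) ((acc.reverse).map pvWrap) cur
              = pvGo rest ((acc.reverse).map pvWrap ++ [pvWrap cur]) [] := by
            simp [pvGo, ha, hs, hc]
          have hacc : (acc.reverse).map pvWrap ++ [pvWrap cur]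
              = (((cur :: acc)).reverse).map pvWrap := by simp
          rw [hstep, hacc, ih [] (cur :: acc) (by intro x hx; simp at hx)]
          simp [ha, hs, hc, PySem.Chars.split₀.go]
      · have hstep : pvGo (c :: rest) ((acc.reverse).map pvWrap) cur
            = pvGo rest ((acc.reverse).map pvWrap) cur := by
          simp [pvGo, ha, hs]
        rw [hstep, ih cur acc hcur]
        simp [ha, hs]

-- ===== VERDICT (by name: the statement is the Claim_ definition above) =====
theorem tokenize_by_letters_spec : Claim_equal_tokenize_by_letters := by
  intro text _
  unfold Spec_tokenize_by_letters tokenize_by_letters tokenize_by_letters_alt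
  have h := pvGo_eq_splitgo (PySem.Chars.lower text.toList) [] []
    (by intro x hx; simp at hx)
  simp only [List.reverse_nil, List.map_nil] at h
  rw [h]
  rw [PySem.List.foldl_append_if
    (fun c => PySem.Chars.isalpha c || PySem.Chars.isspace c) (fun c => c)]
  simp only [List.nil_append, List.map_id']
  rw [PySem.Chars.split₀]
  have h2 := PySem.List.foldl_append_singleton_eq_map
    (fun w : List Char => (List.foldl (fun ls s => ls ++ [String.ofList [s]]) ["_"] w) ++ ["_"])
    (PySem.Chars.split₀.go
      (List.filter (fun c => PySem.Chars.isalpha c || PySem.Chars.isspace c)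
        (PySem.Chars.lower text.toList)) [] []) []
  rw [h2]
  simp only [List.nil_append]
  congr 1
  funext w
  have h3 := PySem.List.foldl_append_singleton_eq_map
    (fun s : Char => String.ofList [s]) w (["_"] : List String)
  rw [h3]
  simp [pvWrap]
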